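-- pv_equiv track=rewrite | github.com/rustacean-station/rustacean-station.org | transcript_tools/transcript_helper.py | munge_code
-- ===== SOURCE A (Python) =====
-- def munge_code(txt, old, new):
--     """ replace one character with another, inside code blocks """
--     chunks = txt.split('`')
--     # An even number of ` characters means an odd number of chunks
--     if len(chunks) % 2 == 0:
--         raise Exception("confusing number of ` characters")
--     result = ''
--     for chunk_num, chunk in enumerate(chunks):
--         if chunk_num % 2:
--             result += '`' + chunk.replace(old, new) + '`'
--         else:
--             result += chunk
--     return result
-- ===== SOURCE B (Python) =====
-- def munge_code(txt, old, new):
--     """ replace one character with another, inside code blocks """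
--     if txt.count('`') % 2 == 1:
--         raise Exception("confusing number of ` characters")
--
--     def go(s):
--         pre, sep, rest = s.partition('`')
--         if not sep:
--             return pre
--         code, _, rest2 = rest.partition('`')
--         return pre + '`' + code.replace(old, new) + '`' + go(rest2)
--
--     return go(txt)
-- ===== Notes on version B (the rewrite author's own statement) =====
-- stated objective: idiomatic
-- what changed: Replaces split-into-chunks plus enumerate/index-parity accumulation with a count-parity guard and a recursive partition('`')-based walk that transforms one code region at a time, with no chunk list or index bookkeeping.
import Mathlib
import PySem

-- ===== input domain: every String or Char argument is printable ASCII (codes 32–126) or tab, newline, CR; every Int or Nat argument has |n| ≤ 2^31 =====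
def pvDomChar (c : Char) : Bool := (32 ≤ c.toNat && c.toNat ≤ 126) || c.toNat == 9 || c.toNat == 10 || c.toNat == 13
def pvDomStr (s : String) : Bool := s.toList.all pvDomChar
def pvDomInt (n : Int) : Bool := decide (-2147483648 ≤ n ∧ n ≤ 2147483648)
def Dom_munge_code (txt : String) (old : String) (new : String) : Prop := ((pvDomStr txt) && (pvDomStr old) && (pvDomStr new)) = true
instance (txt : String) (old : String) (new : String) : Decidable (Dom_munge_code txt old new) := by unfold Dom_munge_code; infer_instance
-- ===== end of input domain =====

-- B replaces A's split-into-chunks + enumerate/index-parity loop by a parity guard plus a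
-- recursive partition-based walk over the string (objective: idiomatic); return values proved equal.


-- ===== PORT A =====
-- chunks = txt.split('`'); if len(chunks) % 2 == 0: raise  (the raise is excluded by Pre_;
-- the port returns "" there); then the enumerate loop with the index-parity test.
def munge_code (txt : String) (old : String) (new : String) : String :=
  let chunks := PySem.Chars.splitOn txt.toList ['`']
  if chunks.length % 2 == 0 then ""   -- Python raises Exception here; outside Pre_
  else
    let res := (PySem.List.enumerate chunks).foldl
      (fun result p =>
        if PySem.Int.mod p.1 2 ≠ 0 then
          result ++ '`' :: PySem.Chars.replace p.2 old.toList new.toList ++ ['`']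
        else result ++ p.2) []
    String.ofList res

-- ===== PORT B =====
-- go(s): pre, sep, rest = s.partition('`') — partition of a single-char separator is exact as
-- takeWhile/dropWhile on the character list (pre = before first '`', rest = after it).
def mungeGo (old new : List Char) (s : List Char) : List Char :=
  let pre := s.takeWhile (fun c => c ≠ '`')
  match h : s.dropWhile (fun c => c ≠ '`') with
  | [] => pre
  | _ :: r =>
    let code := r.takeWhile (fun c => c ≠ '`')
    let rest2 := (r.dropWhile (fun c => c ≠ '`')).drop 1
    pre ++ '`' :: PySem.Chars.replace code old new ++ '`' :: mungeGo old new rest2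
termination_by s.length
decreasing_by
  have ha := List.length_dropWhile_le (fun c => decide (c ≠ '`')) r
  have hb := List.length_dropWhile_le (fun c => decide (c ≠ '`')) s
  rw [h] at hb
  simp only [List.length_drop, List.length_cons] at *
  omega

-- if txt.count('`') % 2 == 1: raise  (outside Pre_; the port returns "" there); else go(txt)
def munge_code_alt (txt : String) (old : String) (new : String) : String :=
  if PySem.Chars.count txt.toList ['`'] % 2 == 1 then ""   -- Python raises Exception here; outside Pre_
  else String.ofList (mungeGo old.toList new.toList txt.toList)

-- ===== PRECONDITION & SPEC =====
-- Pre_ excludes exactly the inputs where the Python A raises: an odd number of '`' characters.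
def Pre_munge_code (txt : String) (old : String) (new : String) : Prop :=
  txt.toList.count '`' % 2 = 0
instance (txt : String) (old : String) (new : String) : Decidable (Pre_munge_code txt old new) := by
  unfold Pre_munge_code; infer_instance

def pvWitness_munge_code : String × String × String := ("see `the code` here", "e", "u")

def Spec_munge_code (txt : String) (old : String) (new : String) (out : String) : Prop := out = munge_code_alt txt old new
instance (txt : String) (old : String) (new : String) (out : String) : Decidable (Spec_munge_code txt old new out) := by unfold Spec_munge_code; infer_instance

-- ===== CLAIM (what is proved, stated in full; the proofs are below) =====
def Claim_equal_munge_code : Prop := ∀ (txt : String) (old : String) (new : String), Dom_munge_code txt old new → Pre_munge_code txt old new → Spec_munge_code txt old new (munge_code txt old new)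

-- ===== LEMMAS AND PROOFS =====

/-- Reference splitter: what `txt.split('`')` computes, written structurally. -/
def split1 : List Char → List (List Char)
  | [] => [[]]
  | c :: t =>
    if c = '`' then [] :: split1 t
    else match split1 t with
      | [] => [[c]]   -- unreachable: split1 is never []
      | h :: m => (c :: h) :: m

theorem split1_ne_nil (s : List Char) : split1 s ≠ [] := by
  induction s with
  | nil => simp [split1]
  | cons c t ih =>
    simp only [split1]
    split_ifs
    · simp
    · cases h : split1 t <;> simp

theorem isPrefixOf_tick_false {c : Char} (t : List Char) (hc : ¬ c = '`') :
    List.isPrefixOf ['`'] (c :: t) = false := by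
  simp [List.isPrefixOf]
  exact fun hb => absurd hb.symm hc

theorem splitOn_go_eq (fuel : Nat) (l cur : List Char) (acc : List (List Char))
    (hf : l.length ≤ fuel) :
    PySem.Chars.splitOn.go ['`'] fuel l cur acc =
      acc.reverse ++ (cur.reverse ++ (split1 l).headI) :: (split1 l).tail := by
  induction fuel generalizing l cur acc with
  | zero =>
    have hl : l = [] := List.eq_nil_of_length_eq_zero (Nat.le_zero.mp hf)
    subst hl
    simp [PySem.Chars.splitOn.go, split1]
  | succ fuel ih =>
    cases l with
    | nil => simp [PySem.Chars.splitOn.go, split1]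
    | cons c t =>
      simp only [PySem.Chars.splitOn.go]
      have ht : t.length ≤ fuel := by simp at hf; omega
      by_cases hc : c = '`'
      · subst hc
        rw [if_pos (by simp [List.isPrefixOf])]
        have hdrop : List.drop (['`'] : List Char).length ('`' :: t) = t := rfl
        rw [hdrop, ih t [] (cur.reverse :: acc) ht]
        have hne := split1_ne_nil t
        cases hst : split1 t with
        | nil => exact absurd hst hne
        | cons h m => simp [split1, hst]
      · rw [if_neg (by simp [isPrefixOf_tick_false t hc])]
        rw [ih t (c :: cur) acc ht]
        have hne := split1_ne_nil t
        cases hst : split1 t with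
        | nil => exact absurd hst hne
        | cons h m => simp [split1, hst, hc]

theorem splitOn_eq_split1 (s : List Char) :
    PySem.Chars.splitOn s ['`'] = split1 s := by
  have h := splitOn_go_eq (s.length + 1) s [] [] (by omega)
  simp only [PySem.Chars.splitOn]
  rw [h]
  have hne := split1_ne_nil s
  cases hs : split1 s with
  | nil => exact absurd hs hne
  | cons a m => simp

theorem count_go_eq (fuel : Nat) (l : List Char) (acc : Nat) (hf : l.length ≤ fuel) :
    PySem.Chars.count.go ['`'] fuel l acc = acc + l.count '`' := by
  induction fuel generalizing l acc with
  | zero =>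
    have hl : l = [] := List.eq_nil_of_length_eq_zero (Nat.le_zero.mp hf)
    subst hl
    simp [PySem.Chars.count.go]
  | succ fuel ih =>
    cases l with
    | nil => simp [PySem.Chars.count.go]
    | cons c t =>
      simp only [PySem.Chars.count.go]
      have ht : t.length ≤ fuel := by simp at hf; omega
      by_cases hc : c = '`'
      · subst hc
        rw [if_pos (by simp [List.isPrefixOf])]
        have hdrop : List.drop (['`'] : List Char).length ('`' :: t) = t := rfl
        rw [hdrop, ih t (acc + 1) ht]
        simp
        omega
      · rw [if_neg (by simp [isPrefixOf_tick_false t hc])]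
        rw [ih t acc ht]
        simp [hc]

theorem count_eq_count (s : List Char) :
    PySem.Chars.count s ['`'] = s.count '`' := by
  simp only [PySem.Chars.count, List.isEmpty_cons, Bool.false_eq_true, if_false]
  rw [count_go_eq s.length s 0 le_rfl]
  omega

theorem split1_length (s : List Char) : (split1 s).length = s.count '`' + 1 := by
  induction s with
  | nil => simp [split1]
  | cons c t ih =>
    simp only [split1]
    by_cases hc : c = '`'
    · subst hc; simp [ih]
    · rw [if_neg hc]
      have hne := split1_ne_nil t
      cases hst : split1 t with
      | nil => exact absurd hst hne
      | cons h m =>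
        rw [hst] at ih
        simp [hc]
        simp at ih
        omega

/-- B's recursion, written on the chunk list (two chunks at a time). -/
def render (old new : List Char) : List (List Char) → List Char
  | [] => []
  | [c] => c
  | c0 :: c1 :: rest => c0 ++ '`' :: PySem.Chars.replace c1 old new ++ '`' :: render old new rest

theorem foldl_enumerate_render (old new : List Char) (chunks : List (List Char))
    (k : Int) (acc : List Char) (hk : 0 ≤ k) (hk2 : PySem.Int.mod k 2 = 0) :
    (PySem.List.enumerate chunks k).foldl
      (fun result p =>
        if PySem.Int.mod p.1 2 ≠ 0 then
          result ++ '`' :: PySem.Chars.replace p.2 old new ++ ['`']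
        else result ++ p.2) acc = acc ++ render old new chunks := by
  induction chunks using render.induct generalizing k acc with
  | case1 => simp [PySem.List.enumerate, render]
  | case2 c =>
    have e1 : PySem.Int.mod k 2 = k % 2 := PySem.Int.mod_eq_emod_of_pos (by norm_num)
    rw [e1] at hk2
    simp only [PySem.List.enumerate, List.foldl_cons, List.foldl_nil]
    rw [if_neg (by rw [e1]; omega : ¬ PySem.Int.mod k 2 ≠ 0)]
    simp [render]
  | case3 c0 c1 rest ih =>
    have e1 : PySem.Int.mod k 2 = k % 2 := PySem.Int.mod_eq_emod_of_pos (by norm_num)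
    have e2 : PySem.Int.mod (k + 1) 2 = (k + 1) % 2 := PySem.Int.mod_eq_emod_of_pos (by norm_num)
    have e3 : PySem.Int.mod (k + 1 + 1) 2 = (k + 1 + 1) % 2 := PySem.Int.mod_eq_emod_of_pos (by norm_num)
    rw [e1] at hk2
    simp only [PySem.List.enumerate, List.foldl_cons]
    rw [if_neg (by rw [e1]; omega : ¬ PySem.Int.mod k 2 ≠ 0)]
    rw [if_pos (by rw [e2]; omega : PySem.Int.mod (k + 1) 2 ≠ 0)]
    rw [ih (k + 1 + 1) _ (by omega) (by rw [e3]; omega)]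
    simp [render]

/-- split1 characterized by takeWhile / dropWhile — the shape B's recursion peels. -/
theorem split1_char (s : List Char) :
    split1 s = s.takeWhile (fun c => c ≠ '`') ::
      (match s.dropWhile (fun c => c ≠ '`') with
        | [] => ([] : List (List Char))
        | _ :: r => split1 r) := by
  induction s with
  | nil => simp [split1]
  | cons c t ih =>
    by_cases hc : c = '`'
    · subst hc; simp [split1, List.takeWhile, List.dropWhile]
    · have hb : (fun c => decide (c ≠ '`')) c = true := by simp [hc]
      simp only [split1, if_neg hc, List.takeWhile_cons, List.dropWhile_cons, hb, if_true]
      rw [ih]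

theorem mungeGo_eq_render (old new : List Char) (n : Nat) (s : List Char)
    (hn : s.length ≤ n) :
    mungeGo old new s = render old new (split1 s) := by
  induction n generalizing s with
  | zero =>
    have hs : s = [] := List.eq_nil_of_length_eq_zero (Nat.le_zero.mp hn)
    subst hs
    rw [mungeGo]
    simp [split1, render]
  | succ n ih =>
    rw [mungeGo, split1_char s]
    cases h : s.dropWhile (fun c => c ≠ '`') with
    | nil => dsimp only; simp [render]
    | cons a r =>
      dsimp only
      rw [split1_char r]
      have hr : r.length < s.length := by
        have h2 := List.length_dropWhile_le (fun c => decide (c ≠ '`')) s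
        rw [h] at h2
        simp at h2
        omega
      cases h2 : r.dropWhile (fun c => c ≠ '`') with
      | nil =>
        simp only [List.drop_nil]
        rw [mungeGo]
        simp [render]
      | cons b r2 =>
        simp only [List.drop_succ_cons, List.drop_zero]
        have hr2 : r2.length ≤ n := by
          have h3 := List.length_dropWhile_le (fun c => decide (c ≠ '`')) r
          rw [h2] at h3
          simp at h3
          omega
        rw [ih r2 hr2]
        simp [render]

theorem munge_code_eq (txt old new : String) (hpre : txt.toList.count '`' % 2 = 0) :
    munge_code txt old new = munge_code_alt txt old new := by
  unfold munge_code munge_code_alt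
  dsimp only
  rw [splitOn_eq_split1, split1_length, count_eq_count]
  have hA : ((txt.toList.count '`' + 1) % 2 == 0) = false := by simp; omega
  have hB : ((txt.toList.count '`') % 2 == 1) = false := by simp; omega
  rw [hA, hB]
  simp only [Bool.false_eq_true, if_false]
  rw [foldl_enumerate_render old.toList new.toList (split1 txt.toList) 0 [] le_rfl (by decide)]
  rw [mungeGo_eq_render old.toList new.toList txt.toList.length txt.toList le_rfl]
  simp

-- ===== VERDICT (by name: the statement is the Claim_ definition above) =====
theorem munge_code_spec : Claim_equal_munge_code := by
  intro txt old new _ hpre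
  unfold Spec_munge_code
  exact munge_code_eq txt old new hpre
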